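-- pv_equiv track=rewrite | github.com/sinkanishk/E6998-HPML-TermProject | utils/model_compression_optimum.py | for_7_attention_layers
-- ===== SOURCE A (Python) =====
-- def for_7_attention_layers(key,n_layers):
--
--     rslt = False
--     for i in range(12):
--         str_A = (f"visual.transformer.resblocks.{i}.attn")
-- #         visual.transformer.resblocks.1.mlp.c
--         str_B = (f"visual.transformer.resblocks.{i}.mlp.c")
--         if key.startswith(str_A) and i<n_layers:
--             rslt = True
--     return rslt
-- ===== SOURCE B (Python) =====
-- def for_7_attention_layers(key, n_layers):
--     prefix = "visual.transformer.resblocks."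
--     if not key.startswith(prefix):
--         return False
--     tok, _, rest = key[len(prefix):].partition(".")
--     if not tok.isdigit() or str(int(tok)) != tok:
--         return False
--     return int(tok) < 12 and int(tok) < n_layers and rest.startswith("attn")
-- ===== Notes on version B (the rewrite author's own statement) =====
-- stated objective: simpler
-- what changed: Instead of generating 12 candidate prefix strings and testing key against each, B partitions the part after the fixed prefix at the first '.', accepts the token only if it is a canonical decimal numeral (tok.isdigit() and str(int(tok)) == tok), and compares its value against 12 and n_layers with 'attn' required right after.
import Mathlib
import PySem

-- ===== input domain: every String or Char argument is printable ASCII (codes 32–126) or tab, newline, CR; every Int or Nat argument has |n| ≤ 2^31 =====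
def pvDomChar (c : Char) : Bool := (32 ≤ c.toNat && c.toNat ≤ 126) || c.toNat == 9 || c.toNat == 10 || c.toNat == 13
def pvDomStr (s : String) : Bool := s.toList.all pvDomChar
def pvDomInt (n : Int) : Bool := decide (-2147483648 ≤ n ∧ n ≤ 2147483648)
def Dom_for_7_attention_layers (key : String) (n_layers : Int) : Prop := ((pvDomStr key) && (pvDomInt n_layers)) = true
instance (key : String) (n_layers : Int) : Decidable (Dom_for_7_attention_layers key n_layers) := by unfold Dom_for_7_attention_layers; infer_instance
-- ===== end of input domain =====

-- B replaces A's loop over 12 generated candidate prefixes by one partition of the key after the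
-- fixed prefix: the token before the first '.' must be a canonical decimal numeral below 12 and
-- below n_layers, followed by 'attn'; objective: simpler.
-- ===== PORT A =====
def for_7_attention_layers (key : String) (n_layers : Int) : Bool :=
  (PySem.List.pyRange 0 12 1).foldl (fun rslt i =>
    let str_A := "visual.transformer.resblocks.".toList ++ PySem.Int.toChars i ++ ".attn".toList
    let _str_B := "visual.transformer.resblocks.".toList ++ PySem.Int.toChars i ++ ".mlp.c".toList
    if PySem.Chars.startswith key.toList str_A && decide (i < n_layers) then true else rslt) false

-- ===== PORT B =====
def for_7_attention_layers_alt (key : String) (n_layers : Int) : Bool :=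
  let pfx := "visual.transformer.resblocks."
  if ¬ PySem.Chars.startswith key.toList pfx.toList then false
  else
    -- Source B's tok, _, rest = key[len(prefix):].partition(".")  — ported by hand, exact:
    -- tok is the run before the first '.', rest everything after it ([] when there is no '.')
    let r := PySem.List.slice key.toList (some (PySem.Chars.len pfx.toList : Int)) none
    let tok := r.takeWhile (fun c => c != '.')
    let rest := (r.drop tok.length).drop 1
    if !(PySem.Chars.strIsdigit tok) then false
    else
      match PySem.Int.ofChars? tok with
      | none => false   -- unreachable: int() succeeds on an all-digit token
      | some v =>
        if PySem.Int.toChars v != tok then false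
        else decide (v < 12) && decide (v < n_layers) && PySem.Chars.startswith rest "attn".toList

-- ===== PRECONDITION & SPEC =====
def Spec_for_7_attention_layers (key : String) (n_layers : Int) (out : Bool) : Prop := out = for_7_attention_layers_alt key n_layers
instance (key : String) (n_layers : Int) (out : Bool) : Decidable (Spec_for_7_attention_layers key n_layers out) := by unfold Spec_for_7_attention_layers; infer_instance

-- ===== CLAIM (what is proved, stated in full; the proofs are below) =====
def Claim_equal_for_7_attention_layers : Prop := ∀ (key : String) (n_layers : Int), Dom_for_7_attention_layers key n_layers → Spec_for_7_attention_layers key n_layers (for_7_attention_layers key n_layers)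

-- ===== LEMMAS AND PROOFS =====

-- A's fixed prefix, named for the proofs
def pvP : List Char := "visual.transformer.resblocks.".toList

lemma pv_foldl_or (c : Int → Bool) : ∀ (l : List Int) (b : Bool),
    l.foldl (fun r i => if c i then true else r) b = (b || l.any c)
  | [], b => by simp
  | x :: t, b => by
    simp only [List.foldl_cons, List.any_cons]
    rw [pv_foldl_or c t]
    cases c x <;> simp

lemma pvA_iff (key : String) (n : Int) :
    for_7_attention_layers key n = true ↔
      ∃ i : Int, 0 ≤ i ∧ i < 12 ∧
        ((pvP ++ (PySem.Int.toChars i ++ ".attn".toList)) <+: key.toList) ∧ i < n := by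
  unfold for_7_attention_layers
  rw [show (fun (rslt : Bool) (i : Int) =>
        let str_A := "visual.transformer.resblocks.".toList ++ PySem.Int.toChars i ++ ".attn".toList
        let _str_B := "visual.transformer.resblocks.".toList ++ PySem.Int.toChars i ++ ".mlp.c".toList
        if PySem.Chars.startswith key.toList str_A && decide (i < n) then true else rslt) =
      (fun (rslt : Bool) (i : Int) =>
        if (PySem.Chars.startswith key.toList
              ("visual.transformer.resblocks.".toList ++ PySem.Int.toChars i ++ ".attn".toList) &&
            decide (i < n)) then true else rslt) from rfl]
  rw [pv_foldl_or]
  simp only [Bool.false_or, List.any_eq_true, Bool.and_eq_true, decide_eq_true_eq,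
    PySem.Chars.startswith_iff, PySem.List.mem_pyRange_one, pvP]
  constructor
  · rintro ⟨i, ⟨h0, h12⟩, hp, hn⟩
    exact ⟨i, h0, h12, by simpa [List.append_assoc] using hp, hn⟩
  · rintro ⟨i, h0, h12, hp, hn⟩
    exact ⟨i, ⟨h0, h12⟩, by simpa [List.append_assoc] using hp, hn⟩

lemma pv_takeWhile_append (p : Char → Bool) (l1 l2 : List Char) (h : ∀ c ∈ l1, p c = true) :
    (l1 ++ l2).takeWhile p = l1 ++ l2.takeWhile p := by
  induction l1 with
  | nil => simp
  | cons c t ih =>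
      simp [h c (by simp), ih (fun x hx => h x (by simp [hx]))]

-- how partition behaves on a key of the shape <digits>.<rest>
lemma pv_parts (cs t : List Char) (hdot : ∀ c ∈ cs, (c != '.') = true) :
    ((cs ++ '.' :: t).takeWhile (fun c => c != '.')) = cs ∧
    (((cs ++ '.' :: t).drop
        ((cs ++ '.' :: t).takeWhile (fun c => c != '.')).length).drop 1) = t := by
  have htw : ((cs ++ '.' :: t).takeWhile (fun c => c != '.')) = cs := by
    rw [pv_takeWhile_append _ cs _ hdot]
    simp
  refine ⟨htw, ?_⟩
  rw [htw, List.drop_left]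
  rfl

-- any key whose partition remainder is nonempty decomposes as tok ++ '.' :: rest
lemma pv_decomp : ∀ r : List Char,
    r.drop (r.takeWhile (fun c => c != '.')).length ≠ [] →
    r = r.takeWhile (fun c => c != '.') ++
        '.' :: ((r.drop (r.takeWhile (fun c => c != '.')).length).drop 1)
  | [], h => absurd rfl h
  | a :: t, h => by
    by_cases hpa : (a != '.') = true
    · simp only [List.takeWhile_cons, hpa, if_true, List.length_cons, List.drop_succ_cons] at h ⊢
      have := pv_decomp t h
      exact congrArg (a :: ·) this
    · have ha : a = '.' := by simpa using hpa
      subst ha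
      simp

-- negative integers print with a leading '-'
lemma pv_neg_head (v : Int) (hv : v < 0) : (PySem.Int.toChars v).head? = some '-' := by
  simp [PySem.Int.toChars, hv]

-- forward half of the crux, for one concrete layer index
lemma pv_fwd (i n : Int) (cs u r : List Char)
    (hcs : PySem.Int.toChars i = cs)
    (hdot : ∀ c ∈ cs, (c != '.') = true)
    (hof : PySem.Int.ofChars? cs = some i)
    (hsd : PySem.Chars.strIsdigit cs = true)
    (hr : r = cs ++ '.' :: ("attn".toList ++ u))
    (h12 : i < 12) (hn : i < n) :
    PySem.Chars.strIsdigit (r.takeWhile (fun c => c != '.')) = true ∧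
      ∃ v : Int, PySem.Int.ofChars? (r.takeWhile (fun c => c != '.')) = some v ∧
        PySem.Int.toChars v = r.takeWhile (fun c => c != '.') ∧ v < 12 ∧ v < n ∧
        PySem.Chars.startswith
          ((r.drop (r.takeWhile (fun c => c != '.')).length).drop 1) "attn".toList = true := by
  subst hr
  obtain ⟨htok, hrest⟩ := pv_parts cs ("attn".toList ++ u) hdot
  rw [htok] at hrest
  rw [htok, hrest]
  exact ⟨hsd, i, hof, hcs, h12, hn,
    (PySem.Chars.startswith_iff _ _).mpr ⟨u, rfl⟩⟩

-- the heart of the equivalence, stated on the part of the key after the fixed prefix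
set_option maxRecDepth 4000 in
lemma pv_crux (r : List Char) (n : Int) :
    (∃ i : Int, 0 ≤ i ∧ i < 12 ∧ ((PySem.Int.toChars i ++ ".attn".toList) <+: r) ∧ i < n) ↔
      (PySem.Chars.strIsdigit (r.takeWhile (fun c => c != '.')) = true ∧
        ∃ v : Int, PySem.Int.ofChars? (r.takeWhile (fun c => c != '.')) = some v ∧
          PySem.Int.toChars v = r.takeWhile (fun c => c != '.') ∧ v < 12 ∧ v < n ∧
          PySem.Chars.startswith
            ((r.drop (r.takeWhile (fun c => c != '.')).length).drop 1) "attn".toList = true) := by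
  constructor
  · rintro ⟨i, h0, h12, ⟨u, hu⟩, hn⟩
    interval_cases i
    · exact pv_fwd 0 n ['0'] u r (by decide) (by intro c hc; fin_cases hc <;> rfl) (by decide) (by decide)
        (by rw [← hu]; rfl) (by norm_num) hn
    · exact pv_fwd 1 n ['1'] u r (by decide) (by intro c hc; fin_cases hc <;> rfl) (by decide) (by decide)
        (by rw [← hu]; rfl) (by norm_num) hn
    · exact pv_fwd 2 n ['2'] u r (by decide) (by intro c hc; fin_cases hc <;> rfl) (by decide) (by decide)
        (by rw [← hu]; rfl) (by norm_num) hn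
    · exact pv_fwd 3 n ['3'] u r (by decide) (by intro c hc; fin_cases hc <;> rfl) (by decide) (by decide)
        (by rw [← hu]; rfl) (by norm_num) hn
    · exact pv_fwd 4 n ['4'] u r (by decide) (by intro c hc; fin_cases hc <;> rfl) (by decide) (by decide)
        (by rw [← hu]; rfl) (by norm_num) hn
    · exact pv_fwd 5 n ['5'] u r (by decide) (by intro c hc; fin_cases hc <;> rfl) (by decide) (by decide)
        (by rw [← hu]; rfl) (by norm_num) hn
    · exact pv_fwd 6 n ['6'] u r (by decide) (by intro c hc; fin_cases hc <;> rfl) (by decide) (by decide)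
        (by rw [← hu]; rfl) (by norm_num) hn
    · exact pv_fwd 7 n ['7'] u r (by decide) (by intro c hc; fin_cases hc <;> rfl) (by decide) (by decide)
        (by rw [← hu]; rfl) (by norm_num) hn
    · exact pv_fwd 8 n ['8'] u r (by decide) (by intro c hc; fin_cases hc <;> rfl) (by decide) (by decide)
        (by rw [← hu]; rfl) (by norm_num) hn
    · exact pv_fwd 9 n ['9'] u r (by decide) (by intro c hc; fin_cases hc <;> rfl) (by decide) (by decide)
        (by rw [← hu]; rfl) (by norm_num) hn
    · exact pv_fwd 10 n ['1','0'] u r (by decide) (by intro c hc; fin_cases hc <;> rfl) (by decide) (by decide)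
        (by rw [← hu]; rfl) (by norm_num) hn
    · exact pv_fwd 11 n ['1','1'] u r (by decide) (by intro c hc; fin_cases hc <;> rfl) (by decide) (by decide)
        (by rw [← hu]; rfl) (by norm_num) hn
  · rintro ⟨hsd, v, hof, hcan, hv12, hvn, hsw⟩
    obtain ⟨u, hu⟩ := (PySem.Chars.startswith_iff _ _).mp hsw
    have hne : r.drop (r.takeWhile (fun c => c != '.')).length ≠ [] := by
      intro h
      rw [h] at hu
      simp at hu
    have hdec := pv_decomp r hne
    have h0 : 0 ≤ v := by
      by_contra hc0
      have h0 : v < 0 := not_le.mp hc0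
      have hhead := pv_neg_head v h0
      rw [hcan] at hhead
      have hsd' : (!(r.takeWhile (fun c => c != '.')).isEmpty &&
          (r.takeWhile (fun c => c != '.')).all PySem.Chars.isdigit) = true := by
        rw [← hsd]; simp [PySem.Chars.strIsdigit]
      simp only [Bool.and_eq_true, List.all_eq_true] at hsd'
      have hmem : '-' ∈ r.takeWhile (fun c => c != '.') :=
        List.mem_of_mem_head? hhead
      have := hsd'.2 '-' hmem
      simp [PySem.Chars.isdigit] at this
    refine ⟨v, h0, hv12, ⟨u, ?_⟩, hvn⟩
    rw [hdec, ← hu, ← hcan]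
    rw [show (".attn".toList : List Char) = '.' :: "attn".toList from rfl]
    simp [List.append_assoc]

-- B's body after the prefix check, as a proposition
lemma pv_alt_bool (tok rest : List Char) (n : Int) :
    ((if !(PySem.Chars.strIsdigit tok) then false
      else match PySem.Int.ofChars? tok with
        | none => false
        | some v =>
          if PySem.Int.toChars v != tok then false
          else decide (v < 12) && decide (v < n) &&
               PySem.Chars.startswith rest "attn".toList) = true)
    ↔ (PySem.Chars.strIsdigit tok = true ∧
        ∃ v : Int, PySem.Int.ofChars? tok = some v ∧ PySem.Int.toChars v = tok ∧
          v < 12 ∧ v < n ∧ PySem.Chars.startswith rest "attn".toList = true) := by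
  cases hsd : PySem.Chars.strIsdigit tok with
  | false => simp
  | true =>
    rcases hof : PySem.Int.ofChars? tok with _ | v
    · simp
    · by_cases hcan : PySem.Int.toChars v = tok
      · simp [hcan, and_assoc]
      · simp [hcan]

-- ===== VERDICT (by name: the statement is the Claim_ definition above) =====
set_option maxRecDepth 20000 in
theorem for_7_attention_layers_spec : Claim_equal_for_7_attention_layers := by
  intro key n _
  unfold Spec_for_7_attention_layers
  refine Bool.coe_iff_coe.mp ?_
  rw [pvA_iff]
  unfold for_7_attention_layers_alt
  dsimp only
  by_cases hp : PySem.Chars.startswith key.toList "visual.transformer.resblocks.".toList = true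
  · have hpl : pvP <+: key.toList := (PySem.Chars.startswith_iff _ _).mp hp
    obtain ⟨r, hr⟩ := hpl
    rw [if_neg (not_not_intro hp)]
    have hrest : PySem.List.slice key.toList
        (some (PySem.Chars.len "visual.transformer.resblocks.".toList : Int)) none = r := by
      rw [show (PySem.Chars.len "visual.transformer.resblocks.".toList : Int) = (29 : Int) from by decide]
      rw [PySem.List.slice_from _ (by norm_num), ← hr]
      rw [show ((29 : Int).toNat) = pvP.length from by decide]
      exact List.drop_left
    rw [hrest]
    have hcancel : ∀ i : Int, ((pvP ++ (PySem.Int.toChars i ++ ".attn".toList)) <+: key.toList) ↔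
        ((PySem.Int.toChars i ++ ".attn".toList) <+: r) := by
      intro i
      rw [← hr]
      exact List.prefix_append_right_inj pvP
    simp only [hcancel]
    rw [pv_crux r n, pv_alt_bool]
  · rw [if_pos hp]
    simp only [Bool.false_eq_true, iff_false]
    rintro ⟨i, _, _, hpre, _⟩
    have hpl : pvP <+: key.toList := (List.prefix_append pvP _).trans hpre
    exact hp ((PySem.Chars.startswith_iff _ _).mpr hpl)
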